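-- pv_equiv track=rewrite | github.com/ecstrayer/nap-trap_paper | src/mpradb/database/db_to_sqlite.py | sort_tables
-- ===== SOURCE A (Python) =====
-- def sort_tables(tmp_tables):
--
--     sorted_tables = {}
--
--     for table_name, columns in tmp_tables.items():
--         col_num = len(columns)
--         if col_num not in sorted_tables:
--             sorted_tables[col_num] = []
--
--         sorted_tables[col_num].append(tuple([table_name,columns]))
--
--
--     for column_number, tables in sorted_tables.items():
--         if len(tables) == 1:
--             continue
--         else:
--             new_tables = []
--             for t in tables:
--                 if t[0].endswith('_iso'):
--                     new_tables.append(t)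
--                 else:
--                     new_tables = [t] + new_tables
--
--         sorted_tables[column_number] = new_tables
--
--
--     tables = []
--
--     for s in sorted(list(sorted_tables.items()), key = lambda a:a[0], reverse= True):
--         tables += s[-1]
--
--     return tables
-- ===== SOURCE B (Python) =====
-- def sort_tables(tmp_tables):
--     def key(p):
--         i, (name, columns) = p
--         iso = name.endswith('_iso')
--         return (-len(columns), iso, i if iso else -i)
--     return [t for _, t in sorted(enumerate(tmp_tables.items()), key=key)]
-- ===== Notes on version B (the rewrite author's own statement) =====
-- stated objective: simpler
-- what changed: Replaces A's three passes (a grouping dict keyed by column count, a per-group two-ended rebuild that prepends non-iso and appends iso tables, and a final sort of the groups) by one sorted() over enumerate(tmp_tables.items()) with the key (-len(columns), endswith('_iso'), signed index).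
import Mathlib
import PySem

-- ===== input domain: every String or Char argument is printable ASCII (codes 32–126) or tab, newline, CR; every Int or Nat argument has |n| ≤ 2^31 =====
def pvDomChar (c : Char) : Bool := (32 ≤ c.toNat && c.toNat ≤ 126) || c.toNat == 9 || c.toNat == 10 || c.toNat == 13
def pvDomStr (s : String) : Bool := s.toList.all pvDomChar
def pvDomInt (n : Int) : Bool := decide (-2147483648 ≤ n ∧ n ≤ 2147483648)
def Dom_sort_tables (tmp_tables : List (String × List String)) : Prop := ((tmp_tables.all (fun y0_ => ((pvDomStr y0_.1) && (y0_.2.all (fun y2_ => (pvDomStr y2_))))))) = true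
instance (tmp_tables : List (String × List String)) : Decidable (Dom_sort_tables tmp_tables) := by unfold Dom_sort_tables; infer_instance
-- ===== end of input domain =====

-- B replaces A's grouping dict + per-group two-ended rebuild + group sort by a single
-- stable key-sort of the enumerated items (objective: simpler; not measured faster).

-- ===== PORT A =====
def pvIso (name : String) : Bool := PySem.Str.endswith name "_iso"

def sort_tables (tmp_tables : List (String × List String)) : List (String × List String) :=
  -- first loop: group the tables by column count into an insertion-ordered dict
  let sorted_tables : PySem.Dict Int (List (String × List String)) :=
    tmp_tables.foldl (fun d p =>
      let col_num : Int := (p.2.length : Int)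
      let d := if d.contains col_num then d else d.insert col_num []
      d.modify col_num [] (fun l => l ++ [(p.1, p.2)])) PySem.Dict.empty
  -- second loop: rebuild each multi-table group (iso appended, non-iso prepended)
  let sorted_tables2 : PySem.Dict Int (List (String × List String)) :=
    sorted_tables.items.foldl (fun d s =>
      if s.2.length == 1 then d
      else d.insert s.1 (s.2.foldl (fun nt t =>
        if pvIso t.1 then nt ++ [t] else [t] ++ nt) [])) sorted_tables
  -- final loop: concatenate the groups by descending column count
  (PySem.List.sorted sorted_tables2.items (fun a => a.1) true).foldl
    (fun tables s => tables ++ s.2) []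

-- ===== PORT B =====
-- key(p) = (-len(columns), iso, i if iso else -i), a Python tuple compared lexicographically
def pvKeyB (p : Int × (String × List String)) : Int ×ₗ (Bool ×ₗ Int) :=
  let iso := pvIso p.2.1
  toLex (-(p.2.2.length : Int), toLex (iso, if iso then p.1 else -p.1))

def sort_tables_alt (tmp_tables : List (String × List String)) : List (String × List String) :=
  (PySem.List.sorted (PySem.List.enumerate tmp_tables 0) pvKeyB false).map (·.2)

-- ===== PRECONDITION & SPEC =====
def Spec_sort_tables (tmp_tables : List (String × List String)) (out : List (String × List String)) : Prop := out = sort_tables_alt tmp_tables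
instance (tmp_tables : List (String × List String)) (out : List (String × List String)) : Decidable (Spec_sort_tables tmp_tables out) := by unfold Spec_sort_tables; infer_instance

-- ===== CLAIM (what is proved, stated in full; the proofs are below) =====
def Claim_equal_sort_tables : Prop := ∀ (tmp_tables : List (String × List String)), Dom_sort_tables tmp_tables → Spec_sort_tables tmp_tables (sort_tables tmp_tables)

-- ===== LEMMAS AND PROOFS =====

-- named pieces of port A (definitionally equal to the inline code of `sort_tables`)
def pvLen (p : String × List String) : Int := (p.2.length : Int)

def pvStep1 (d : PySem.Dict Int (List (String × List String))) (p : String × List String) :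
    PySem.Dict Int (List (String × List String)) :=
  let col_num : Int := (p.2.length : Int)
  let d := if d.contains col_num then d else d.insert col_num []
  d.modify col_num [] (fun l => l ++ [(p.1, p.2)])

def pvRebuild (ts : List (String × List String)) : List (String × List String) :=
  ts.foldl (fun nt t => if pvIso t.1 then nt ++ [t] else [t] ++ nt) []

def pvStep2 (d : PySem.Dict Int (List (String × List String)))
    (s : Int × List (String × List String)) : PySem.Dict Int (List (String × List String)) :=
  if s.2.length == 1 then d else d.insert s.1 (pvRebuild s.2)

def pvH (ts : List (String × List String)) : List (String × List String) :=
  if ts.length == 1 then ts else pvRebuild ts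

def pvD1 (t : List (String × List String)) : PySem.Dict Int (List (String × List String)) :=
  t.foldl pvStep1 PySem.Dict.empty

def pvD2 (t : List (String × List String)) : PySem.Dict Int (List (String × List String)) :=
  (pvD1 t).items.foldl pvStep2 (pvD1 t)

def pvGc (t : List (String × List String)) (c : Int) : List (String × List String) :=
  t.filter (fun p => pvLen p == c)

def pvE (t : List (String × List String)) : List (Int × (String × List String)) :=
  PySem.List.enumerate t 0

def pvL (t : List (String × List String)) : List (Int × List (String × List String)) :=
  PySem.List.sorted (pvD2 t).items (fun a => a.1) true

def pvBlk (t : List (String × List String)) (c : Int) : List (Int × (String × List String)) :=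
  ((pvE t).filter (fun q => pvLen q.2 == c && !pvIso q.2.1)).reverse ++
    (pvE t).filter (fun q => pvLen q.2 == c && pvIso q.2.1)

lemma pv_sort_tables_eq (t : List (String × List String)) :
    sort_tables t = (pvL t).foldl (fun tables s => tables ++ s.2) [] := rfl

lemma pv_keys_step1 (d : PySem.Dict Int (List (String × List String))) (p : String × List String) :
    (pvStep1 d p).keys = if d.contains (pvLen p) then d.keys else d.keys ++ [pvLen p] := by
  by_cases hc : d.contains (pvLen p) = true
  · simp only [pvLen] at hc
    simp only [pvStep1, pvLen, hc, if_true, PySem.Dict.keys_modify]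
    rw [PySem.Dict.keys_insert_of_contains _ _ hc]
  · simp only [pvLen] at hc
    simp only [pvStep1, pvLen, hc, PySem.Dict.keys_modify]
    rw [if_neg (by simp),
      PySem.Dict.keys_insert_of_contains _ _ (by simp),
      PySem.Dict.keys_insert_of_not_contains _ _ (by simpa using hc)]
    simp

lemma pv_getD_step1 (d : PySem.Dict Int (List (String × List String))) (p : String × List String) (c : Int) :
    (pvStep1 d p).getD c [] = if c = pvLen p then d.getD c [] ++ [p] else d.getD c [] := by
  by_cases hc : d.contains (pvLen p) = true
  · simp only [pvLen] at hc
    simp only [pvStep1, pvLen, hc, if_true, PySem.Dict.getD_modify]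
    by_cases hcp : c = (p.2.length : Int)
    · rw [if_pos hcp, if_pos hcp]; subst hcp; rfl
    · rw [if_neg hcp, if_neg hcp]
  · simp only [pvLen] at hc
    simp only [pvStep1, pvLen, hc]
    rw [if_neg (by simp), PySem.Dict.getD_modify]
    by_cases hcp : c = (p.2.length : Int)
    · simp [hcp, PySem.Dict.getD_of_not_contains _ _ (by simpa using hc)]
    · simp [hcp, PySem.Dict.getD_insert]
lemma pv_flatMap_congr {α β : Type} (l : List α) (f g : α → List β)
    (h : ∀ a ∈ l, f a = g a) : l.flatMap f = l.flatMap g := by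
  induction l with
  | nil => rfl
  | cons a l ih =>
    simp only [List.flatMap_cons]
    rw [h a (List.mem_cons_self), ih (fun a ha => h a (List.mem_cons_of_mem _ ha))]

lemma pv_mem_keys_step1 (d : PySem.Dict Int (List (String × List String))) (p : String × List String) (c : Int) :
    c ∈ (pvStep1 d p).keys ↔ c ∈ d.keys ∨ c = pvLen p := by
  rw [pv_keys_step1]
  by_cases hc : d.contains (pvLen p) = true
  · simp only [hc, if_true]
    constructor
    · exact Or.inl
    · rintro (h | rfl)
      · exact h
      · exact (PySem.Dict.contains_iff_mem_keys _ _).mp hc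
  · simp [hc, List.mem_append]

lemma pv_mem_keys_fold1 (l : List (String × List String)) (d : PySem.Dict Int (List (String × List String))) (c : Int) :
    c ∈ (l.foldl pvStep1 d).keys ↔ c ∈ d.keys ∨ c ∈ l.map pvLen := by
  induction l generalizing d with
  | nil => simp
  | cons p l ih =>
    simp only [List.foldl_cons, List.map_cons, List.mem_cons]
    rw [ih, pv_mem_keys_step1]
    tauto

lemma pv_nodup_keys_fold1 (l : List (String × List String)) (d : PySem.Dict Int (List (String × List String)))
    (h : d.keys.Nodup) : (l.foldl pvStep1 d).keys.Nodup := by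
  induction l generalizing d with
  | nil => exact h
  | cons p l ih =>
    refine ih _ ?_
    rw [pv_keys_step1]
    by_cases hc : d.contains (pvLen p) = true
    · simpa [hc] using h
    · have hnm : pvLen p ∉ d.keys := fun hm => hc ((PySem.Dict.contains_iff_mem_keys _ _).mpr hm)
      simp [hc, List.nodup_append, h]
      exact fun a ha he => hnm (he ▸ ha)

lemma pv_getD_fold1 (l : List (String × List String)) (d : PySem.Dict Int (List (String × List String))) (c : Int) :
    (l.foldl pvStep1 d).getD c [] = d.getD c [] ++ l.filter (fun p => pvLen p == c) := by
  induction l generalizing d with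
  | nil => simp
  | cons p l ih =>
    simp only [List.foldl_cons, List.filter_cons]
    rw [ih, pv_getD_step1]
    by_cases hcp : c = pvLen p
    · simp [hcp, List.append_assoc]
    · have : (pvLen p == c) = false := beq_eq_false_iff_ne.mpr (Ne.symm hcp)
      simp [hcp, this]

lemma pv_nodup_keys_d1 (t : List (String × List String)) : (pvD1 t).keys.Nodup :=
  pv_nodup_keys_fold1 t PySem.Dict.empty (by simp [PySem.Dict.keys_empty])

lemma pv_items_d1 (t : List (String × List String)) :
    (pvD1 t).items = (pvD1 t).keys.map (fun c => (c, pvGc t c)) := by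
  rw [PySem.Dict.items_eq_map_keys _ (pv_nodup_keys_d1 t) []]
  refine List.map_congr_left (fun c _ => ?_)
  simp [pvD1, pv_getD_fold1, PySem.Dict.getD_empty, pvGc]

lemma pv_keys_fold2 (l : List (Int × List (String × List String))) (d : PySem.Dict Int (List (String × List String)))
    (h : ∀ s ∈ l, s.1 ∈ d.keys) : (l.foldl pvStep2 d).keys = d.keys := by
  induction l generalizing d with
  | nil => rfl
  | cons s l ih =>
    have hk : (pvStep2 d s).keys = d.keys := by
      unfold pvStep2
      split
      · rfl
      · exact PySem.Dict.keys_insert_of_contains _ _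
          ((PySem.Dict.contains_iff_mem_keys _ _).mpr (h s (List.mem_cons_self)))
    simp only [List.foldl_cons]
    rw [ih _ (fun s' hs' => by rw [hk]; exact h s' (List.mem_cons_of_mem _ hs')), hk]

lemma pv_get?_fold2_not_mem (l : List (Int × List (String × List String)))
    (d : PySem.Dict Int (List (String × List String))) (c : Int)
    (h : c ∉ l.map (·.1)) : (l.foldl pvStep2 d).get? c = d.get? c := by
  induction l generalizing d with
  | nil => rfl
  | cons s l ih =>
    simp only [List.map_cons, List.mem_cons, not_or] at h
    simp only [List.foldl_cons]
    rw [ih _ h.2]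
    unfold pvStep2
    split
    · rfl
    · rw [PySem.Dict.get?_insert, if_neg h.1]

lemma pv_get?_fold2 (l : List (Int × List (String × List String)))
    (d : PySem.Dict Int (List (String × List String)))
    (hnd : (l.map (·.1)).Nodup) (hl : ∀ s ∈ l, d.get? s.1 = some s.2) :
    ∀ s ∈ l, (l.foldl pvStep2 d).get? s.1 = some (pvH s.2) := by
  induction l generalizing d with
  | nil => intro s hs; simp at hs
  | cons s0 l ih =>
    have hnd' : (s0.1 :: l.map (·.1)).Nodup := by simpa using hnd
    have hnm : s0.1 ∉ l.map (·.1) := (List.nodup_cons.mp hnd').1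
    intro s hs
    rcases List.mem_cons.mp hs with rfl | hs'
    · simp only [List.foldl_cons]
      rw [pv_get?_fold2_not_mem _ _ _ hnm]
      unfold pvStep2 pvH
      split
      · exact hl s (List.mem_cons_self)
      · rw [PySem.Dict.get?_insert, if_pos rfl]
    · simp only [List.foldl_cons]
      refine ih _ ((List.nodup_cons.mp hnd').2) ?_ s hs'
      intro s' hs'
      have hne : s'.1 ≠ s0.1 := by
        intro he
        exact hnm (he ▸ List.mem_map_of_mem hs')
      unfold pvStep2
      split
      · exact hl s' (List.mem_cons_of_mem _ hs')
      · rw [PySem.Dict.get?_insert, if_neg hne]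
        exact hl s' (List.mem_cons_of_mem _ hs')

lemma pv_keys_d2 (t : List (String × List String)) : (pvD2 t).keys = (pvD1 t).keys :=
  pv_keys_fold2 _ _ (fun s hs => by
    simpa [PySem.Dict.keys] using List.mem_map_of_mem (f := (·.1)) hs)

lemma pv_nodup_keys_d2 (t : List (String × List String)) : (pvD2 t).keys.Nodup := by
  rw [pv_keys_d2]; exact pv_nodup_keys_d1 t

lemma pv_items_d2 (t : List (String × List String)) :
    (pvD2 t).items = (pvD1 t).keys.map (fun c => (c, pvH (pvGc t c))) := by
  rw [PySem.Dict.items_eq_map_keys _ (pv_nodup_keys_d2 t) [], pv_keys_d2]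
  refine List.map_congr_left (fun c hc => ?_)
  have hmem : (c, pvGc t c) ∈ (pvD1 t).items := by
    rw [pv_items_d1]; exact List.mem_map_of_mem hc
  have hnd1 : ((pvD1 t).items.map (·.1)).Nodup := by
    have := pv_nodup_keys_d1 t
    simpa [PySem.Dict.keys] using this
  have hget := pv_get?_fold2 (pvD1 t).items (pvD1 t) hnd1
    (fun s hs => PySem.Dict.get?_of_mem_items _ hs (pv_nodup_keys_d1 t))
    (c, pvGc t c) hmem
  have : (pvD2 t).getD c [] = pvH (pvGc t c) :=
    PySem.Dict.getD_of_get?_eq_some _ _ hget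
  rw [this]

lemma pv_rebuild_fold {α : Type} (b : α → Bool) (ts acc : List α) :
    ts.foldl (fun nt t => if b t then nt ++ [t] else [t] ++ nt) acc =
      (ts.filter (fun t => !b t)).reverse ++ acc ++ ts.filter b := by
  induction ts generalizing acc with
  | nil => simp
  | cons t ts ih =>
    simp only [List.foldl_cons, List.filter_cons]
    cases hb : b t with
    | true => rw [ih]; simp [List.append_assoc]
    | false => rw [ih]; simp [List.append_assoc]

lemma pv_H_eq (ts : List (String × List String)) :
    pvH ts = (ts.filter (fun t => !pvIso t.1)).reverse ++ ts.filter (fun t => pvIso t.1) := by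
  by_cases h1 : (ts.length == 1) = true
  · match ts, h1 with
    | [t], _ =>
      cases hio : pvIso t.1 <;> simp [pvH, hio]
  · have : pvRebuild ts = (ts.filter (fun t => !pvIso t.1)).reverse ++ ts.filter (fun t => pvIso t.1) := by
      unfold pvRebuild
      rw [pv_rebuild_fold (fun t => pvIso t.1) ts []]
      simp
    simp [pvH, h1, this]

lemma pv_map_snd_blk (t : List (String × List String)) (c : Int) :
    (pvBlk t c).map (·.2) = pvH (pvGc t c) := by
  have hfil : ∀ f : (String × List String) → Bool,
      ((pvE t).filter (fun q => f q.2)).map (·.2) = t.filter f := by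
    intro f
    conv_rhs => rw [← PySem.List.map_snd_enumerate t 0]
    rw [show t = t from rfl]
    rw [List.filter_map]
    rfl
  rw [pv_H_eq]
  unfold pvBlk
  rw [List.map_append, List.map_reverse]
  congr 1
  · rw [hfil (fun p => pvLen p == c && !pvIso p.1)]
    congr 1
    unfold pvGc
    rw [List.filter_filter]
    exact List.filter_congr (fun x _ => by cases h : pvIso x.1 <;> cases h2 : (pvLen x == c) <;> simp_all)
  · rw [hfil (fun p => pvLen p == c && pvIso p.1)]
    unfold pvGc
    rw [List.filter_filter]
    exact List.filter_congr (fun x _ => by cases h : pvIso x.1 <;> cases h2 : (pvLen x == c) <;> simp_all)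

lemma pv_partition_perm (cs : List Int) (E : List (Int × (String × List String)))
    (hnd : cs.Nodup) (hcov : ∀ q ∈ E, pvLen q.2 ∈ cs) :
    (cs.flatMap (fun c => E.filter (fun q => pvLen q.2 == c))).Perm E := by
  induction cs generalizing E with
  | nil =>
    cases E with
    | nil => simp
    | cons q E => exact absurd (hcov q (List.mem_cons_self)) (List.not_mem_nil)
  | cons c0 cs ih =>
    simp only [List.flatMap_cons]
    have hc0 : c0 ∉ cs := (List.nodup_cons.mp hnd).1
    have hstep : cs.flatMap (fun c => E.filter (fun q => pvLen q.2 == c)) =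
        cs.flatMap (fun c => (E.filter (fun q => !(pvLen q.2 == c0))).filter (fun q => pvLen q.2 == c)) := by
      refine pv_flatMap_congr _ _ _ (fun c hc => ?_)
      have hne : c ≠ c0 := fun he => hc0 (he ▸ hc)
      rw [List.filter_filter]
      refine (List.filter_congr (fun q _ => ?_)).symm
      cases h : (pvLen q.2 == c)
      · simp_all
      · have hqc : pvLen q.2 = c := by simpa using h
        simp [hqc, hne]
    rw [hstep]
    have hperm' := ih (E.filter (fun q => !(pvLen q.2 == c0))) ((List.nodup_cons.mp hnd).2)
      (fun q hq => by
        have h1 := List.mem_filter.mp hq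
        have h2 := hcov q h1.1
        rcases List.mem_cons.mp h2 with he | hm
        · exact absurd (by simpa using h1.2) (by simp [he])
        · exact hm)
    exact (List.Perm.append (List.Perm.refl _) hperm').trans
      (List.filter_append_perm (fun q => pvLen q.2 == c0) E)

lemma pv_blk_perm (t : List (String × List String)) (c : Int) :
    (pvBlk t c).Perm ((pvE t).filter (fun q => pvLen q.2 == c)) := by
  unfold pvBlk
  have h1 : ((pvE t).filter (fun q => pvLen q.2 == c && !pvIso q.2.1)).reverse.Perm
      ((pvE t).filter (fun q => pvLen q.2 == c && !pvIso q.2.1)) := List.reverse_perm _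
  refine (h1.append (List.Perm.refl _)).trans ?_
  have hA : (pvE t).filter (fun q => pvLen q.2 == c && !pvIso q.2.1) =
      ((pvE t).filter (fun q => pvLen q.2 == c)).filter (fun q => !pvIso q.2.1) := by
    rw [List.filter_filter]
    exact List.filter_congr (fun q _ => by cases h : pvIso q.2.1 <;> cases h2 : (pvLen q.2 == c) <;> simp_all)
  have hB : (pvE t).filter (fun q => pvLen q.2 == c && pvIso q.2.1) =
      ((pvE t).filter (fun q => pvLen q.2 == c)).filter (fun q => pvIso q.2.1) := by
    rw [List.filter_filter]
    exact List.filter_congr (fun q _ => by cases h : pvIso q.2.1 <;> cases h2 : (pvLen q.2 == c) <;> simp_all)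
  rw [hA, hB]
  refine List.perm_append_comm.trans ?_
  have := List.filter_append_perm (fun q : Int × (String × List String) => pvIso q.2.1)
    ((pvE t).filter (fun q => pvLen q.2 == c))
  exact this

lemma pv_cov (t : List (String × List String)) (q : Int × (String × List String))
    (hq : q ∈ pvE t) : pvLen q.2 ∈ (pvD1 t).keys := by
  have hmem : q.2 ∈ t := by
    rcases (PySem.List.mem_enumerate_iff t 0 q).mp hq with ⟨k, hk, rfl⟩
    exact List.getElem_mem hk
  rw [show (pvD1 t).keys = (t.foldl pvStep1 PySem.Dict.empty).keys from rfl]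
  rw [pv_mem_keys_fold1]
  exact Or.inr (List.mem_map_of_mem hmem)

lemma pv_ys_perm (t : List (String × List String)) :
    ((pvL t).flatMap (fun s => pvBlk t s.1)).Perm (pvE t) := by
  have h1 : ((pvL t).flatMap (fun s => pvBlk t s.1)).Perm
      ((pvD2 t).items.flatMap (fun s => pvBlk t s.1)) :=
    List.Perm.flatMap (PySem.List.sorted_perm _ _ _) (fun a _ => List.Perm.refl _)
  refine h1.trans ?_
  rw [pv_items_d2, List.flatMap_map]
  have h2 : ((pvD1 t).keys.flatMap (fun c => pvBlk t c)).Perm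
      ((pvD1 t).keys.flatMap (fun c => (pvE t).filter (fun q => pvLen q.2 == c))) :=
    List.Perm.flatMap (List.Perm.refl _) (fun c _ => pv_blk_perm t c)
  exact h2.trans (pv_partition_perm _ _ (pv_nodup_keys_d1 t) (fun q hq => pv_cov t q hq))

lemma pv_pairwise_flatMap {α β : Type} (R : β → β → Prop) (g : α → List β) (L : List α)
    (hc : L.Pairwise (fun s s' => ∀ q ∈ g s, ∀ q' ∈ g s', R q q'))
    (hi : ∀ s ∈ L, (g s).Pairwise R) : (L.flatMap g).Pairwise R := by
  induction L with
  | nil => simp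
  | cons s L ih =>
    simp only [List.flatMap_cons]
    rw [List.pairwise_append]
    refine ⟨hi s (List.mem_cons_self), ih ((List.pairwise_cons.mp hc).2)
      (fun s' hs' => hi s' (List.mem_cons_of_mem _ hs')), ?_⟩
    intro a ha b hb
    rcases List.mem_flatMap.mp hb with ⟨s', hs', hb'⟩
    exact (List.pairwise_cons.mp hc).1 s' hs' a ha b hb'

lemma pv_mem_blk (t : List (String × List String)) (c : Int)
    (q : Int × (String × List String)) (h : q ∈ pvBlk t c) : pvLen q.2 = c := by
  unfold pvBlk at h
  rcases List.mem_append.mp h with h' | h'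
  · have := (List.mem_filter.mp (List.mem_reverse.mp h')).2
    simp only [Bool.and_eq_true, beq_iff_eq] at this
    exact this.1
  · have := (List.mem_filter.mp h').2
    simp only [Bool.and_eq_true, beq_iff_eq] at this
    exact this.1

lemma pv_keyB_lt_left (q q' : Int × (String × List String))
    (h : pvLen q'.2 < pvLen q.2) : pvKeyB q < pvKeyB q' := by
  simp only [pvLen] at h
  simp only [pvKeyB, Prod.Lex.lt_iff, ofLex_toLex]
  left
  omega

lemma pv_keyB_lt_nn (q q' : Int × (String × List String))
    (hl : pvLen q.2 = pvLen q'.2) (hq : pvIso q.2.1 = false) (hq' : pvIso q'.2.1 = false)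
    (h : q'.1 < q.1) : pvKeyB q < pvKeyB q' := by
  simp only [pvLen] at hl
  simp [pvKeyB, hq, hq', Prod.Lex.lt_iff]
  omega

lemma pv_keyB_lt_ii (q q' : Int × (String × List String))
    (hl : pvLen q.2 = pvLen q'.2) (hq : pvIso q.2.1 = true) (hq' : pvIso q'.2.1 = true)
    (h : q.1 < q'.1) : pvKeyB q < pvKeyB q' := by
  simp only [pvLen] at hl
  simp [pvKeyB, hq, hq', Prod.Lex.lt_iff]
  omega

lemma pv_keyB_lt_ni (q q' : Int × (String × List String))
    (hl : pvLen q.2 = pvLen q'.2) (hq : pvIso q.2.1 = false) (hq' : pvIso q'.2.1 = true) :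
    pvKeyB q < pvKeyB q' := by
  simp only [pvLen] at hl
  simp [pvKeyB, hq, hq', Prod.Lex.lt_iff, Bool.lt_iff]
  omega

lemma pv_blk_pairwise (t : List (String × List String)) (c : Int) :
    (pvBlk t c).Pairwise (fun q q' => pvKeyB q < pvKeyB q') := by
  have hE : (pvE t).Pairwise (fun q q' => q.1 < q'.1) := PySem.List.pairwise_lt_enumerate t 0
  unfold pvBlk
  rw [List.pairwise_append]
  refine ⟨?_, ?_, ?_⟩
  · rw [List.pairwise_reverse]
    refine List.Pairwise.imp_of_mem ?_ (hE.filter _)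
    intro a b ha hb hlt
    have ha' := (List.mem_filter.mp ha).2
    have hb' := (List.mem_filter.mp hb).2
    simp only [Bool.and_eq_true, beq_iff_eq, Bool.not_eq_true'] at ha' hb'
    exact pv_keyB_lt_nn b a (by rw [hb'.1, ha'.1]) hb'.2 ha'.2 hlt
  · refine List.Pairwise.imp_of_mem ?_ (hE.filter _)
    intro a b ha hb hlt
    have ha' := (List.mem_filter.mp ha).2
    have hb' := (List.mem_filter.mp hb).2
    simp only [Bool.and_eq_true, beq_iff_eq] at ha' hb'
    exact pv_keyB_lt_ii a b (by rw [ha'.1, hb'.1]) ha'.2 hb'.2 hlt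
  · intro a ha b hb
    have ha' := (List.mem_filter.mp (List.mem_reverse.mp ha)).2
    have hb' := (List.mem_filter.mp hb).2
    simp only [Bool.and_eq_true, beq_iff_eq, Bool.not_eq_true'] at ha' hb'
    exact pv_keyB_lt_ni a b (by rw [ha'.1, hb'.1]) ha'.2 hb'.2

lemma pv_L_pairwise (t : List (String × List String)) :
    (pvL t).Pairwise (fun s s' => s'.1 < s.1) := by
  have hs : (pvL t).Pairwise (fun a b => b.1 ≤ a.1) :=
    PySem.List.sorted_pairwise_rev ((pvD2 t).items) (fun a => a.1)
  have hperm : (pvL t).Perm ((pvD2 t).items) := PySem.List.sorted_perm _ _ _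
  have hnd : ((pvL t).map (·.1)).Nodup := by
    refine (List.Perm.map (·.1) hperm).symm.nodup ?_
    have := pv_nodup_keys_d2 t
    simpa [PySem.Dict.keys] using this
  have hne : (pvL t).Pairwise (fun a b => a.1 ≠ b.1) := List.pairwise_map.mp hnd
  refine (hs.and hne).imp ?_
  rintro a b ⟨h1, h2⟩
  exact lt_of_le_of_ne h1 (Ne.symm h2)

lemma pv_ys_pairwise (t : List (String × List String)) :
    ((pvL t).flatMap (fun s => pvBlk t s.1)).Pairwise (fun q q' => pvKeyB q < pvKeyB q') := by
  refine pv_pairwise_flatMap _ _ _ ?_ (fun s _ => pv_blk_pairwise t s.1)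
  refine (pv_L_pairwise t).imp_of_mem ?_
  intro s s' _ _ hlt q hq q' hq'
  exact pv_keyB_lt_left q q' (by rw [pv_mem_blk t _ _ hq, pv_mem_blk t _ _ hq']; exact hlt)

lemma pv_sorted_eq (t : List (String × List String)) :
    PySem.List.sorted (pvE t) pvKeyB false = (pvL t).flatMap (fun s => pvBlk t s.1) :=
  PySem.List.sorted_eq_of_perm_of_pairwise_lt _ _ pvKeyB (pv_ys_perm t) (pv_ys_pairwise t)

-- ===== VERDICT (by name: the statement is the Claim_ definition above) =====
theorem sort_tables_spec : Claim_equal_sort_tables := by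
  intro t _
  show sort_tables t = sort_tables_alt t
  rw [pv_sort_tables_eq]
  rw [PySem.List.foldl_append_eq_flatMap (fun s : Int × List (String × List String) => s.2) (pvL t) []]
  rw [List.nil_append]
  have hmemL : ∀ s ∈ pvL t, s.2 = (pvBlk t s.1).map (·.2) := by
    intro s hs
    have hs' : s ∈ (pvD2 t).items := (PySem.List.sorted_perm _ _ _).mem_iff.mp hs
    rw [pv_items_d2] at hs'
    rcases List.mem_map.mp hs' with ⟨c, _, rfl⟩
    rw [pv_map_snd_blk]
  rw [pv_flatMap_congr _ _ _ hmemL]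
  rw [show (fun s : Int × List (String × List String) => (pvBlk t s.1).map (·.2)) =
    (fun s => ((fun s : Int × List (String × List String) => pvBlk t s.1) s).map (·.2)) from rfl]
  rw [← List.map_flatMap]
  rw [← pv_sorted_eq]
  rfl
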